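-- pv_equiv track=rewrite | github.com/CodeWizard-404/ISET | 2_DSI/S2/Python/TP3/EX4.py | syracuse_sequence
-- ===== SOURCE A (Python) =====
-- def syracuse_sequence(n):
--     if n == 1:
--         return (1, 1, 1)
--
--     if n % 2 == 0:
--         next_term = n // 2
--     else:
--         next_term = 3 * n + 1
--
--     initial_number, duration, altitude = syracuse_sequence(next_term)
--     return (initial_number, duration + 1, max(altitude, next_term))
-- ===== SOURCE B (Python) =====
-- def syracuse_sequence(n):
--     if n == 1:
--         return (1, 1, 1)
--     duration = 1
--     altitude = 1
--     while n != 1: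
--         n = n // 2 if n % 2 == 0 else 3 * n + 1
--         duration += 1
--         altitude = max(altitude, n)
--     return (1, duration, altitude)
-- ===== Notes on version B (the rewrite author's own statement) =====
-- stated objective: idiomatic
-- what changed: Replaced the non-tail recursion (one stack frame per Collatz step, combining results on the way back up) with a plain iterative while-loop carrying duration/altitude accumulators.
import Mathlib
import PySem

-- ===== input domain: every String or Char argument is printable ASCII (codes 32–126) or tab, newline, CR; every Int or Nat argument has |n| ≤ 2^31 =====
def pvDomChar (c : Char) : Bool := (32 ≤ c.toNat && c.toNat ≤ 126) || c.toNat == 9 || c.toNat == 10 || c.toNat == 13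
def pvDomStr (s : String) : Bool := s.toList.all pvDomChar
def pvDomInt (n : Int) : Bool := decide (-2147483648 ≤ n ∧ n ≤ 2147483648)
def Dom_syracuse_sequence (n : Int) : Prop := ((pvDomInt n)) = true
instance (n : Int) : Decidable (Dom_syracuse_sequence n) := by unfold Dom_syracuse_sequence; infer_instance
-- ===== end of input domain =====

-- ===== PORT A =====
-- B is an iterative while-loop instead of A's stack recursion (return value equivalence; constant space).
-- Both ports run the same step-for-step computation under a common large fuel bound (a totality guard only).
def pvStep (n : Int) : Int :=
  if PySem.Int.mod n 2 = 0 then PySem.Int.floordiv n 2 else 3 * n + 1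

def pvSyrA : Nat → Int → Int × Int × Int
  | 0, _ => (1, 1, 1)
  | k + 1, n =>
    if n = 1 then (1, 1, 1)
    else
      let next_term := pvStep n
      let r := pvSyrA k next_term
      (r.1, r.2.1 + 1, max r.2.2 next_term)

def syracuse_sequence (n : Int) : Int × Int × Int := pvSyrA 100000 n

-- ===== PORT B =====
def pvSyrLoop : Nat → Int → Int → Int → Int × Int × Int
  | 0, _, d, a => (1, d, a)
  | k + 1, n, d, a =>
    if n = 1 then (1, d, a)
    else
      let m := pvStep n
      pvSyrLoop k m (d + 1) (max a m)

def syracuse_sequence_alt (n : Int) : Int × Int × Int :=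
  if n = 1 then (1, 1, 1) else pvSyrLoop 100000 n 1 1

-- ===== PRECONDITION & SPEC =====
-- Pre_ excludes n < 1: there the Python A never reaches 1 and raises RecursionError (B loops forever).
def Pre_syracuse_sequence (n : Int) : Prop := 1 ≤ n
instance (n : Int) : Decidable (Pre_syracuse_sequence n) := by unfold Pre_syracuse_sequence; infer_instance
def pvWitness_syracuse_sequence : Int := 7
def Spec_syracuse_sequence (n : Int) (out : Int × Int × Int) : Prop := out = syracuse_sequence_alt n
instance (n : Int) (out : Int × Int × Int) : Decidable (Spec_syracuse_sequence n out) := by unfold Spec_syracuse_sequence; infer_instance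

-- ===== CLAIM (what is proved, stated in full; the proofs are below) =====
def Claim_equal_syracuse_sequence : Prop := ∀ (n : Int), Dom_syracuse_sequence n → Pre_syracuse_sequence n → Spec_syracuse_sequence n (syracuse_sequence n)

-- ===== LEMMAS AND PROOFS =====

lemma pvSyrA_fst (k : Nat) : ∀ n, (pvSyrA k n).1 = 1 := by
  induction k with
  | zero => intro n; simp [pvSyrA]
  | succ k ih =>
    intro n
    by_cases h : n = 1 <;> simp [pvSyrA, h, ih]

lemma pvSyrA_alt_ge (k : Nat) : ∀ n, 1 ≤ (pvSyrA k n).2.2 := by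
  induction k with
  | zero => intro n; simp [pvSyrA]
  | succ k ih =>
    intro n
    by_cases h : n = 1
    · simp [pvSyrA, h]
    · simp only [pvSyrA, h, if_false]
      exact le_trans (ih (pvStep n)) (le_max_left _ _)

lemma pvSyrLoop_eq (k : Nat) :
    ∀ n d a, 1 ≤ a →
      pvSyrLoop k n d a = (1, d - 1 + (pvSyrA k n).2.1, max a (pvSyrA k n).2.2) := by
  induction k with
  | zero =>
    intro n d a ha
    simp [pvSyrLoop, pvSyrA, max_eq_left ha]
  | succ k ih =>
    intro n d a ha
    by_cases h : n = 1
    · simp [pvSyrLoop, pvSyrA, h, max_eq_left ha]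
    · simp only [pvSyrLoop, pvSyrA, h, if_false]
      rw [ih (pvStep n) (d + 1) (max a (pvStep n)) (le_trans ha (le_max_left _ _))]
      refine Prod.ext rfl (Prod.ext ?_ ?_)
      · simp
      · simp; rw [max_comm (pvStep n)]

-- ===== VERDICT (by name: the statement is the Claim_ definition above) =====
theorem syracuse_sequence_spec : Claim_equal_syracuse_sequence := by
  intro n _ _
  unfold Spec_syracuse_sequence syracuse_sequence syracuse_sequence_alt
  by_cases h : n = 1
  · subst h
    simp [pvSyrA]
  · rw [pvSyrLoop_eq 100000 n 1 1 le_rfl]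
    have h1 := pvSyrA_fst 100000 n
    have h2 := pvSyrA_alt_ge 100000 n
    simp only [h, if_false]
    refine Prod.ext ?_ (Prod.ext ?_ ?_) <;> simp [h1, max_eq_right h2]
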